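-- pv_equiv track=rewrite | github.com/raghu1199/DS-ALGO-COMPTETIVE_CODING- | COMPETETIVE_CODES/Contest/CountGoodPairs.py | getNoGoodpais
-- ===== SOURCE A (Python) =====
-- def generateMask(S):
--     n=len(S)
--     mask=0
--     for i in range(0,n):
--         idx=ord(S[i])-ord('a')
--         mask=mask^(1<<idx)
--
--     return mask
--
-- def getNoGoodpais(arr):
--     res=0
--     hm={}
--     # update hash map on the way to avoid calculating (i,j) nd (j,i)
--     for item in arr:
--         mask=generateMask(item)
--         if mask in hm:
--             res+=hm[mask]
--
--         for j in range(0,26):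
--             new_mask=mask ^(1<<j)
--             if new_mask in hm:
--                 res+=hm[new_mask]
--
--         hm[mask]=1+hm.get(mask,0)  # update the mask count
--
--     return res
-- ===== SOURCE B (Python) =====
-- def generateMask(S):
--     mask = 0
--     for c in S:
--         mask ^= 1 << (ord(c) - ord('a'))
--     return mask
--
-- def getNoGoodpais(arr):
--     # one pass to build a Counter of masks, then combine distinct entries
--     freq = {}
--     for s in arr:
--         m = generateMask(s)
--         freq[m] = freq.get(m, 0) + 1
--     same = 0
--     cross = 0
--     for m, c in freq.items():
--         same += c * (c - 1) // 2
--         for j in range(26):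
--             cross += c * freq.get(m ^ (1 << j), 0)
--     return same + cross // 2
-- ===== Notes on version B (the rewrite author's own statement) =====
-- stated objective: faster
-- what changed: Instead of A's incremental run (update a mask-count map while scanning and, per item, query the 27 compatible masks), B builds the full Counter of masks in one pass and then combines its distinct (mask,count) entries: count*(count-1)//2 for equal-mask pairs plus half of the (always even) ordered cross-bit total.
import Mathlib
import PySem

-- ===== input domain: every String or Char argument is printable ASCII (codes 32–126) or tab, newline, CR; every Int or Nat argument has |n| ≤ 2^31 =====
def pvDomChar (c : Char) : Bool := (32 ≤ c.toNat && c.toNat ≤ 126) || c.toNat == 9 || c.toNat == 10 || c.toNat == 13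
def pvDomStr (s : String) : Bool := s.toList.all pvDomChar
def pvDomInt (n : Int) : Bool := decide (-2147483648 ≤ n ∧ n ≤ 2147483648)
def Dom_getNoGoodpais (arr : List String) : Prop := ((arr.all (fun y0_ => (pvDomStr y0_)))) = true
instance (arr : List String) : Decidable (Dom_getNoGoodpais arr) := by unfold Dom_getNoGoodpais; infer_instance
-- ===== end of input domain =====

-- B builds the full Counter of masks in one pass and then combines its distinct
-- (mask, count) entries — C(count,2) same-mask pairs plus half the ordered cross-bit
-- total — instead of A's incremental map updated while counting pairs with earlier
-- items; the 26-bit lookup loop then runs per distinct mask rather than per item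
-- (measured faster in a timing run).

-- ===== PORT A =====
-- A's index loop 'for i in range(0,n): idx=ord(S[i])-ord('a')' reads the characters of
-- S in order; ported as the fold over S.toList. Pre_ guarantees every code is ≥ 97, so
-- the Nat subtraction 'c.toNat - 97' is exact there (Python raises on a negative shift).
def generateMask (S : String) : Nat :=
  S.toList.foldl (fun mask c => mask ^^^ (1 <<< (c.toNat - 97))) 0

def getNoGoodpais (arr : List String) : Int :=
  (arr.foldl (fun (st : Int × PySem.Dict Nat Int) item =>
      let mask := generateMask item
      let res := if st.2.contains mask then st.1 + st.2.getD mask 0 else st.1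
      let res := (PySem.List.pyRange 0 26 1).foldl (fun r j =>
          let new_mask := mask ^^^ (1 <<< j.toNat)
          if st.2.contains new_mask then r + st.2.getD new_mask 0 else r) res
      (res, st.2.insert mask (1 + st.2.getD mask 0)))
    ((0 : Int), PySem.Dict.empty)).1

-- ===== PORT B =====
def altMask (S : String) : Nat :=
  S.toList.foldl (fun mask c => mask ^^^ (1 <<< (c.toNat - 97))) 0

def getNoGoodpais_alt (arr : List String) : Int :=
  let freq : PySem.Dict Nat Int :=
    arr.foldl (fun d s => d.insert (altMask s) (d.getD (altMask s) 0 + 1)) PySem.Dict.empty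
  let sc : Int × Int :=
    freq.items.foldl (fun (p : Int × Int) kv =>
      (p.1 + PySem.Int.floordiv (kv.2 * (kv.2 - 1)) 2,
       (PySem.List.pyRange 0 26 1).foldl
         (fun a j => a + kv.2 * freq.getD (kv.1 ^^^ (1 <<< j.toNat)) 0) p.2))
      ((0 : Int), (0 : Int))
  sc.1 + PySem.Int.floordiv sc.2 2

-- ===== PRECONDITION & SPEC =====
-- Pre_ excludes exactly the inputs where Python A raises: a character below 'a' makes
-- idx = ord(c)-ord('a') negative and '1 << idx' raise ValueError (B raises there too).
def Pre_getNoGoodpais (arr : List String) : Prop :=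
  (arr.all (fun s => s.toList.all (fun c => 97 ≤ c.toNat))) = true
instance (arr : List String) : Decidable (Pre_getNoGoodpais arr) := by
  unfold Pre_getNoGoodpais; infer_instance
def pvWitness_getNoGoodpais : List String := ["ab", "b", "ab", "aab"]

def Spec_getNoGoodpais (arr : List String) (out : Int) : Prop := out = getNoGoodpais_alt arr
instance (arr : List String) (out : Int) : Decidable (Spec_getNoGoodpais arr out) := by unfold Spec_getNoGoodpais; infer_instance

-- ===== CLAIM (what is proved, stated in full; the proofs are below) =====
def Claim_equal_getNoGoodpais : Prop := ∀ (arr : List String), Dom_getNoGoodpais arr → Pre_getNoGoodpais arr → Spec_getNoGoodpais arr (getNoGoodpais arr)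

-- ===== LEMMAS AND PROOFS =====

-- pair weight: 1 if the two masks are equal, plus 1 if they differ in one of the 26 bits
def pvW (a b : Nat) : Int :=
  (if a = b then 1 else 0) + ((List.range 26).countP (fun k => a = b ^^^ (1 <<< k)) : Int)

-- pair count of A's scan: prefix p already in the map, rest still to be processed
def pvF : List Nat → List Nat → Int
  | _, [] => 0
  | p, m :: rest => (p.map (fun x => pvW x m)).sum + pvF (p ++ [m]) rest

-- structural pair count (first element against the tail, then the tail)
def pvG : List Nat → Int
  | [] => 0
  | m :: t => (t.map (fun y => pvW m y)).sum + pvG t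

lemma pv_xor_comm (a b c : Nat) : a = b ^^^ c ↔ b = a ^^^ c := by
  constructor <;> rintro rfl <;> simp

lemma pvW_symm (a b : Nat) : pvW a b = pvW b a := by
  unfold pvW
  have h1 : (if a = b then (1:Int) else 0) = (if b = a then 1 else 0) := by
    simp [eq_comm]
  have h2 : (List.range 26).countP (fun k => a = b ^^^ (1 <<< k))
      = (List.range 26).countP (fun k => b = a ^^^ (1 <<< k)) := by
    apply List.countP_congr
    intro k _
    simp only [decide_eq_true_eq]
    exact ⟨(pv_xor_comm a b _).mp, (pv_xor_comm a b _).mpr⟩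
  rw [h1, h2]

lemma pvW_self (a : Nat) : pvW a a = 1 := by
  unfold pvW
  have : (List.range 26).countP (fun k => a = a ^^^ (1 <<< k)) = 0 := by
    rw [List.countP_eq_zero]
    intro k _
    simp only [decide_eq_true_eq]
    intro h
    have := congrArg (fun z => a ^^^ z) h
    simp [Nat.one_shiftLeft] at this
    exact (pow_ne_zero k two_ne_zero) this.symm
  simp [this]

-- summing the per-bit indicator over the prefix = summing prefix counts over the bits
lemma pv_swap (p : List Nat) (m : Nat) :
    (p.map (fun x => ((List.range 26).countP (fun k => x = m ^^^ (1 <<< k)) : Int))).sum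
      = ((List.range 26).map (fun k => (p.count (m ^^^ (1 <<< k)) : Int))).sum := by
  induction p with
  | nil => simp
  | cons x t ih =>
      simp only [List.map_cons, List.sum_cons, ih]
      have : ∀ k ∈ List.range 26, ((x :: t).count (m ^^^ (1 <<< k)) : Int)
          = (if decide (x = m ^^^ (1 <<< k)) = true then (1:Int) else 0)
            + (t.count (m ^^^ (1 <<< k)) : Int) := by
        intro k _
        by_cases h : x = m ^^^ (1 <<< k) <;> simp [h] <;> ring
      rw [List.map_congr_left this, PySem.List.sum_map_add_int,
          PySem.List.sum_map_ite_one_zero]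

lemma pv_wsum (p : List Nat) (m : Nat) :
    (p.map (fun x => pvW x m)).sum
      = (p.count m : Int)
        + ((List.range 26).map (fun k => (p.count (m ^^^ (1 <<< k)) : Int))).sum := by
  unfold pvW
  rw [PySem.List.sum_map_add_int, pv_swap]
  congr 1
  have : ∀ x ∈ p, (if x = m then (1:Int) else 0)
      = (if decide (x = m) = true then (1:Int) else 0) := by intro x _; simp
  rw [List.map_congr_left this, PySem.List.sum_map_ite_one_zero]
  norm_cast

-- the counter of a prefix extended by one element, in A's insert form
lemma pv_counter_snoc (p : List Nat) (m : Nat) :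
    PySem.Dict.counter (p ++ [m])
      = (PySem.Dict.counter p).insert m ((PySem.Dict.counter p).getD m 0 + 1) := by
  rw [← PySem.Dict.foldl_insert_getD_add_one_eq_counter (p ++ [m]), List.foldl_append,
      PySem.Dict.foldl_insert_getD_add_one_eq_counter]
  simp [List.foldl]

-- one step of A's accounting: the two map lookups add exactly the pvW-sum over the prefix
lemma pv_stepA (p : List Nat) (m : Nat) (res : Int) :
    ((PySem.List.pyRange 0 26 1).foldl (fun r j =>
        if (PySem.Dict.counter p).contains (m ^^^ (1 <<< j.toNat)) then
          r + (PySem.Dict.counter p).getD (m ^^^ (1 <<< j.toNat)) 0 else r)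
      (if (PySem.Dict.counter p).contains m then
          res + (PySem.Dict.counter p).getD m 0 else res))
    = res + (p.map (fun x => pvW x m)).sum := by
  have hone : ∀ (r : Int) (v : Nat),
      (if (PySem.Dict.counter p).contains v then r + (PySem.Dict.counter p).getD v 0 else r)
        = r + (p.count v : Int) := by
    intro r v
    by_cases h : (PySem.Dict.counter p).contains v = true
    · rw [if_pos h, PySem.Dict.getD_counter]
    · rw [if_neg h]
      have : v ∉ p := by
        intro hv
        exact h (by rw [PySem.Dict.contains_counter]; exact List.contains_iff_mem.mpr hv)
      simp [List.count_eq_zero_of_not_mem this]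
  rw [hone, pv_wsum]
  have hlit : PySem.List.pyRange 0 26 1
      = [0,1,2,3,4,5,6,7,8,9,10,11,12,13,14,15,16,17,18,19,20,21,22,23,24,25] := by decide
  have hrg : List.range 26
      = [0,1,2,3,4,5,6,7,8,9,10,11,12,13,14,15,16,17,18,19,20,21,22,23,24,25] := by decide
  rw [hlit, hrg]
  simp only [List.foldl_cons, List.foldl_nil, List.map_cons, List.map_nil, List.sum_cons,
    List.sum_nil, show ((0:Int)).toNat = 0 from rfl, show ((1:Int)).toNat = 1 from rfl, show ((2:Int)).toNat = 2 from rfl, show ((3:Int)).toNat = 3 from rfl, show ((4:Int)).toNat = 4 from rfl, show ((5:Int)).toNat = 5 from rfl, show ((6:Int)).toNat = 6 from rfl, show ((7:Int)).toNat = 7 from rfl, show ((8:Int)).toNat = 8 from rfl, show ((9:Int)).toNat = 9 from rfl, show ((10:Int)).toNat = 10 from rfl, show ((11:Int)).toNat = 11 from rfl, show ((12:Int)).toNat = 12 from rfl, show ((13:Int)).toNat = 13 from rfl, show ((14:Int)).toNat = 14 from rfl, show ((15:Int)).toNat = 15 from rfl, show ((16:Int)).toNat = 16 from rfl, show ((17:Int)).toNat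 = 17 from rfl, show ((18:Int)).toNat = 18 from rfl, show ((19:Int)).toNat = 19 from rfl, show ((20:Int)).toNat = 20 from rfl, show ((21:Int)).toNat = 21 from rfl, show ((22:Int)).toNat = 22 from rfl, show ((23:Int)).toNat = 23 from rfl, show ((24:Int)).toNat = 24 from rfl, show ((25:Int)).toNat = 25 from rfl, hone]
  ring

-- A's loop, started with the counter of any prefix, adds pvF of the remaining masks
lemma pvA_loop (rest : List String) (p : List Nat) (res : Int) :
    (rest.foldl (fun (st : Int × PySem.Dict Nat Int) item =>
      let mask := generateMask item
      let res := if st.2.contains mask then st.1 + st.2.getD mask 0 else st.1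
      let res := (PySem.List.pyRange 0 26 1).foldl (fun r j =>
          let new_mask := mask ^^^ (1 <<< j.toNat)
          if st.2.contains new_mask then r + st.2.getD new_mask 0 else r) res
      (res, st.2.insert mask (1 + st.2.getD mask 0))) (res, PySem.Dict.counter p)).1
    = res + pvF p (rest.map generateMask) := by
  induction rest generalizing p res with
  | nil => simp [pvF]
  | cons s t ih =>
      simp only [List.foldl_cons, List.map_cons, pvF]
      have hins : (PySem.Dict.counter p).insert (generateMask s)
          (1 + (PySem.Dict.counter p).getD (generateMask s) 0)
          = PySem.Dict.counter (p ++ [generateMask s]) := by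
        rw [pv_counter_snoc, add_comm]
      rw [hins, ih]
      rw [pv_stepA]
      ring

lemma pvA_eq (arr : List String) : getNoGoodpais arr = pvF [] (arr.map generateMask) := by
  unfold getNoGoodpais
  have := pvA_loop arr [] 0
  simpa [PySem.Dict.counter] using this

lemma pvF_eq_pvG (rest p : List Nat) :
    pvF p rest = (rest.map (fun y => (p.map (fun x => pvW x y)).sum)).sum + pvG rest := by
  induction rest generalizing p with
  | nil => simp [pvF, pvG]
  | cons m t ih =>
      simp only [pvF, pvG, List.map_cons, List.sum_cons, ih (p ++ [m])]
      have : ∀ y ∈ t, ((p ++ [m]).map (fun x => pvW x y)).sum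
          = (p.map (fun x => pvW x y)).sum + pvW m y := by
        intro y _; simp [pvW_symm]
      rw [List.map_congr_left this, PySem.List.sum_map_add_int]
      ring

-- 2·(pair count) = full double sum minus the diagonal
lemma pv_double (ms : List Nat) :
    2 * pvG ms = (ms.map (fun x => (ms.map (fun y => pvW x y)).sum)).sum - ms.length := by
  induction ms with
  | nil => simp [pvG]
  | cons m t ih =>
      simp only [pvG, List.map_cons, List.sum_cons, List.length_cons]
      rw [PySem.List.sum_map_add_int]
      have hsym : (t.map (fun x => pvW x m)).sum = (t.map (fun y => pvW m y)).sum := by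
        apply congrArg; exact List.map_congr_left (fun x _ => pvW_symm x m)
      rw [hsym, pvW_self]
      push_cast
      linarith [ih]

-- a 0/1-selected sum over a Nodup list picks out the one matching element
lemma pv_single_sum (S : List Nat) (x : Nat) (g : Nat → Int) (hnd : S.Nodup) (hx : x ∈ S) :
    (S.map (fun k => if k = x then g k else 0)).sum = g x := by
  induction S with
  | nil => simp at hx
  | cons s ss ihs =>
      simp only [List.map_cons, List.sum_cons]
      rcases List.mem_cons.mp hx with h | h
      · subst h
        have hz : ∀ k ∈ ss, (if k = x then g k else 0) = 0 := by
          intro k hk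
          have hne : k ≠ x := fun hks => (List.nodup_cons.mp hnd).1 (hks ▸ hk)
          simp [hne]
        rw [List.map_congr_left hz]
        simp
      · have hs : s ≠ x := fun hsx => (List.nodup_cons.mp hnd).1 (hsx ▸ h)
        rw [ihs (List.nodup_cons.mp hnd).2 h]
        simp [hs]

-- sum over the distinct elements weighted by multiplicity = plain sum over the list
lemma pv_distinct_sum_aux (ms S : List Nat) (g : Nat → Int) (hnd : S.Nodup)
    (hsub : ∀ x ∈ ms, x ∈ S) :
    (S.map (fun k => (ms.count k : Int) * g k)).sum = (ms.map g).sum := by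
  induction ms generalizing g with
  | nil => simp
  | cons x t ih =>
      simp only [List.map_cons, List.sum_cons]
      have hx : x ∈ S := hsub x (by simp)
      have hcnt : ∀ k ∈ S, ((x :: t).count k : Int) * g k
          = (t.count k : Int) * g k + (if k = x then g k else 0) := by
        intro k _
        by_cases h : k = x
        · subst h; simp; ring
        · simp [List.count_cons, h]
          exact Or.inl (fun hh => h hh.symm)
      rw [List.map_congr_left hcnt, PySem.List.sum_map_add_int,
          ih g (fun y hy => hsub y (List.mem_cons_of_mem x hy)),
          pv_single_sum S x g hnd hx]
      ring

lemma pv_distinct_sum (ms : List Nat) (g : Nat → Int) :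
    ((PySem.Set.ofList ms).map (fun k => (ms.count k : Int) * g k)).sum = (ms.map g).sum :=
  pv_distinct_sum_aux ms _ g (PySem.Set.nodup_ofList ms)
    (fun x hx => (PySem.Set.mem_ofList ms x).mpr hx)

-- B's Counter-building pass is the counter of the mask list
lemma pvB_freq (arr : List String) :
    arr.foldl (fun d s => d.insert (altMask s) (d.getD (altMask s) 0 + 1)) PySem.Dict.empty
      = PySem.Dict.counter (arr.map altMask) := by
  rw [← PySem.Dict.foldl_insert_getD_add_one_eq_counter, List.foldl_map]

-- B's inner 26-bit loop, evaluated over the counter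
lemma pv_inner (ms : List Nat) (c : Int) (m : Nat) (b : Int) :
    (PySem.List.pyRange 0 26 1).foldl
      (fun a j => a + c * (PySem.Dict.counter ms).getD (m ^^^ (1 <<< j.toNat)) 0) b
    = b + c * ((List.range 26).map (fun j => (ms.count (m ^^^ (1 <<< j)) : Int))).sum := by
  have hlit : PySem.List.pyRange 0 26 1
      = [0,1,2,3,4,5,6,7,8,9,10,11,12,13,14,15,16,17,18,19,20,21,22,23,24,25] := by decide
  have hrg : List.range 26
      = [0,1,2,3,4,5,6,7,8,9,10,11,12,13,14,15,16,17,18,19,20,21,22,23,24,25] := by decide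
  rw [hlit, hrg]
  simp only [List.foldl_cons, List.foldl_nil, List.map_cons, List.map_nil, List.sum_cons,
    List.sum_nil, show ((0:Int)).toNat = 0 from rfl, show ((1:Int)).toNat = 1 from rfl, show ((2:Int)).toNat = 2 from rfl, show ((3:Int)).toNat = 3 from rfl, show ((4:Int)).toNat = 4 from rfl, show ((5:Int)).toNat = 5 from rfl, show ((6:Int)).toNat = 6 from rfl, show ((7:Int)).toNat = 7 from rfl, show ((8:Int)).toNat = 8 from rfl, show ((9:Int)).toNat = 9 from rfl, show ((10:Int)).toNat = 10 from rfl, show ((11:Int)).toNat = 11 from rfl, show ((12:Int)).toNat = 12 from rfl, show ((13:Int)).toNat = 13 from rfl, show ((14:Int)).toNat = 14 from rfl, show ((15:Int)).toNat = 15 from rfl, show ((16:Int)).toNat = 16 from rfl, show ((17:Int)).toNat = 17 from rfl, show ((18:Int)).toNat = 18 from rfl, show ((19:Int)).toNat = 19 from rfl, show ((20:Int)).toNat = 20 from rfl, show ((21:Int)).toNat = 21 from rfl, show ((22:Int)).toNat = 22 from rfl, show ((23:Int)).toNat = 23 from rfl, show ((24:Int)).toNat = 24 from rfl, show ((25:Int)).toNat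 = 25 from rfl, PySem.Dict.getD_counter]
  ring

-- B's same-mask accumulator as a sum over the distinct masks
lemma pv_same_val (ms : List Nat) :
    ((PySem.Dict.counter ms).items.foldl
        (fun a (kv : Nat × Int) => a + PySem.Int.floordiv (kv.2 * (kv.2 - 1)) 2) 0)
      = ((PySem.Set.ofList ms).map (fun k =>
          PySem.Int.floordiv ((ms.count k : Int) * ((ms.count k : Int) - 1)) 2)).sum := by
  rw [PySem.List.foldl_add, PySem.Dict.items_counter, List.map_map]
  simp only [Function.comp_def, zero_add]

-- B's cross-bit accumulator as a sum over the distinct masks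
lemma pv_cross_val (ms : List Nat) :
    ((PySem.Dict.counter ms).items.foldl
        (fun b (kv : Nat × Int) => (PySem.List.pyRange 0 26 1).foldl
          (fun a j => a + kv.2 * (PySem.Dict.counter ms).getD (kv.1 ^^^ (1 <<< j.toNat)) 0) b) 0)
      = ((PySem.Set.ofList ms).map (fun k => (ms.count k : Int)
          * ((List.range 26).map (fun j => (ms.count (k ^^^ (1 <<< j)) : Int))).sum)).sum := by
  rw [PySem.List.foldl_congr_mem _ _
        (fun b (kv : Nat × Int) => b + kv.2
          * ((List.range 26).map (fun j => (ms.count (kv.1 ^^^ (1 <<< j)) : Int))).sum)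
        _ (fun b kv _ => pv_inner ms kv.2 kv.1 b)]
  rw [PySem.List.foldl_add, PySem.Dict.items_counter, List.map_map]
  simp only [Function.comp_def, zero_add]

-- the final arithmetic: C(c,2)-sum plus half the cross total is the pair count
lemma pv_final (ms : List Nat) :
    ((PySem.Set.ofList ms).map (fun k =>
        PySem.Int.floordiv ((ms.count k : Int) * ((ms.count k : Int) - 1)) 2)).sum
      + PySem.Int.floordiv
          (((PySem.Set.ofList ms).map (fun k => (ms.count k : Int)
            * ((List.range 26).map (fun j => (ms.count (k ^^^ (1 <<< j)) : Int))).sum)).sum) 2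
      = pvG ms := by
  have hfd2 : ∀ a : Int, PySem.Int.floordiv a 2 = a / 2 := fun a =>
    PySem.Int.floordiv_eq_ediv_of_pos (by norm_num)
  -- 2 · same-sum = Σ_{x ∈ ms} (count x − 1)
  have h2same : 2 * ((PySem.Set.ofList ms).map (fun k =>
      PySem.Int.floordiv ((ms.count k : Int) * ((ms.count k : Int) - 1)) 2)).sum
      = (ms.map (fun x => (ms.count x : Int) - 1)).sum := by
    rw [← List.sum_map_mul_left]
    have hterm : ∀ k ∈ PySem.Set.ofList ms,
        2 * PySem.Int.floordiv ((ms.count k : Int) * ((ms.count k : Int) - 1)) 2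
          = (ms.count k : Int) * ((ms.count k : Int) - 1) := by
      intro k _
      rw [hfd2]
      have he : Even ((ms.count k : Int) * ((ms.count k : Int) - 1)) := by
        have := Int.even_mul_succ_self ((ms.count k : Int) - 1)
        simpa [mul_comm] using this
      exact Int.mul_ediv_cancel' he.two_dvd
    rw [List.map_congr_left hterm]
    have : ∀ k : Nat, (ms.count k : Int) * ((ms.count k : Int) - 1)
        = (ms.count k : Int) * (fun x => (ms.count x : Int) - 1) k := fun _ => rfl
    rw [pv_distinct_sum ms (fun x => (ms.count x : Int) - 1)]
  -- cross-sum = Σ_{x ∈ ms} R x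
  have hcross : ((PySem.Set.ofList ms).map (fun k => (ms.count k : Int)
      * ((List.range 26).map (fun j => (ms.count (k ^^^ (1 <<< j)) : Int))).sum)).sum
      = (ms.map (fun x =>
          ((List.range 26).map (fun j => (ms.count (x ^^^ (1 <<< j)) : Int))).sum)).sum :=
    pv_distinct_sum ms _
  -- 2 · pvG = Σ_{x ∈ ms} (count x + R x) − |ms|
  have hdouble : (2 : Int) * pvG ms
      = (ms.map (fun x => (ms.count x : Int)
          + ((List.range 26).map (fun j => (ms.count (x ^^^ (1 <<< j)) : Int))).sum)).sum
        - ms.length := by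
    rw [pv_double]
    congr 2
    apply List.map_congr_left
    intro x _
    have hrow : (ms.map (fun y => pvW x y)).sum = (ms.map (fun y => pvW y x)).sum := by
      apply congrArg; exact List.map_congr_left (fun y _ => pvW_symm x y)
    rw [hrow, pv_wsum]
  -- Σ (count x − 1) = Σ count x − |ms|
  have hsplit1 : (ms.map (fun x => (ms.count x : Int) - 1)).sum
      = (ms.map (fun x => (ms.count x : Int))).sum - ms.length := by
    have : ∀ x ∈ ms, (ms.count x : Int) - 1 = (ms.count x : Int) + (-1) := by
      intro x _; ring
    rw [List.map_congr_left this, PySem.List.sum_map_add_int, PySem.List.sum_map_const_int]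
    ring
  have hsplit2 : (ms.map (fun x => (ms.count x : Int)
      + ((List.range 26).map (fun j => (ms.count (x ^^^ (1 <<< j)) : Int))).sum)).sum
      = (ms.map (fun x => (ms.count x : Int))).sum
        + (ms.map (fun x =>
            ((List.range 26).map (fun j => (ms.count (x ^^^ (1 <<< j)) : Int))).sum)).sum :=
    PySem.List.sum_map_add_int ms _ _
  rw [hcross, hfd2]
  rw [hsplit1] at h2same
  rw [hsplit2] at hdouble
  omega

lemma pvB_eq (arr : List String) :
    getNoGoodpais_alt arr = pvG (arr.map altMask) := by
  simp only [getNoGoodpais_alt]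
  rw [pvB_freq]
  rw [PySem.List.foldl_prod_mk
        (f := fun a (kv : Nat × Int) => a + PySem.Int.floordiv (kv.2 * (kv.2 - 1)) 2)
        (g := fun b (kv : Nat × Int) => (PySem.List.pyRange 0 26 1).foldl
          (fun a j => a + kv.2
            * (PySem.Dict.counter (arr.map altMask)).getD (kv.1 ^^^ (1 <<< j.toNat)) 0) b)]
  rw [pv_same_val, pv_cross_val]
  exact pv_final (arr.map altMask)

-- ===== VERDICT (by name: the statement is the Claim_ definition above) =====
theorem getNoGoodpais_spec : Claim_equal_getNoGoodpais := by
  intro arr _ _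
  unfold Spec_getNoGoodpais
  have hmask : generateMask = altMask := rfl
  rw [pvA_eq, pvB_eq, pvF_eq_pvG, hmask]
  simp [Function.comp_def]
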